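-- pv_equiv track=rewrite | github.com/raeez/chiral-bar-cobar | compute/lib/verdier_hecke_bridge.py | eta_power_qexp
-- ===== SOURCE A (Python) =====
-- def eta_power_qexp(exponent, nmax):
--     """
--     q-expansion of eta(tau)^exponent (integer exponent).
--     Returns coefficients of q^{exponent/24} * sum a[m] q^m.
--     """
--     if exponent == 0:
--         coeffs = [0] * (nmax + 1)
--         coeffs[0] = 1
--         return coeffs
--
--     if exponent > 0:
--         # eta^exponent = prod(1-q^k)^exponent, multiply exponent times
--         coeffs = [0] * (nmax + 1)
--         coeffs[0] = 1
--         for k in range(1, nmax + 1):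
--             for _ in range(exponent):
--                 for m in range(nmax, k - 1, -1):
--                     coeffs[m] -= coeffs[m - k]
--         return coeffs
--     else:
--         # eta^{-|exponent|} = 1/eta^|exp| = prod(1-q^k)^{-|exp|}
--         # Use 1/(1-q^k) = sum q^{mk} and iterate
--         neg_exp = -exponent
--         coeffs = [0] * (nmax + 1)
--         coeffs[0] = 1
--         for k in range(1, nmax + 1):
--             for _ in range(neg_exp):
--                 for m in range(k, nmax + 1):
--                     coeffs[m] += coeffs[m - k]
--         return coeffs
-- ===== SOURCE B (Python) =====
-- def eta_power_qexp(exponent, nmax):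
--     """
--     q-expansion of eta(tau)^exponent (integer exponent).
--     Returns coefficients of q^{exponent/24} * sum a[m] q^m.
--     """
--     N = nmax + 1
--     if exponent == 0:
--         out = [0] * N
--         out[0] = 1
--         return out
--     # E = prod_{k=1..nmax} (1 - q^k) truncated at q^nmax, one pass per factor
--     E = [0] * N
--     E[0] = 1
--     for k in range(1, nmax + 1):
--         E = [E[m] - (E[m - k] if m >= k else 0) for m in range(N)]
--
--     def mul(a, b):
--         return [sum(a[i] * b[n - i] for i in range(n + 1)) for n in range(N)]
--
--     def power(base, e):
--         # binary exponentiation of a truncated power series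
--         r = [0] * N
--         r[0] = 1
--         while e > 0:
--             if e % 2 == 1:
--                 r = mul(r, base)
--             base = mul(base, base)
--             e //= 2
--         return r
--
--     if exponent >= 0:
--         return power(E, exponent)
--     # negative exponent: invert E^{|exponent|} (constant term 1)
--     F = power(E, -exponent)
--     inv = [0] * N
--     inv[0] = 1
--     for n in range(1, N):
--         inv[n] = -sum(F[i] * inv[n - i] for i in range(1, n + 1))
--     return inv
-- ===== Notes on version B (the rewrite author's own statement) =====
-- stated objective: faster
-- what changed: B computes the truncated product prod(1-q^k) once, raises it to |exponent| by binary exponentiation with truncated series multiplication, and for negative exponents inverts the result with a single series-inversion recurrence, instead of A's |exponent| separate factor-by-factor in-place passes.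
import Mathlib
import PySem

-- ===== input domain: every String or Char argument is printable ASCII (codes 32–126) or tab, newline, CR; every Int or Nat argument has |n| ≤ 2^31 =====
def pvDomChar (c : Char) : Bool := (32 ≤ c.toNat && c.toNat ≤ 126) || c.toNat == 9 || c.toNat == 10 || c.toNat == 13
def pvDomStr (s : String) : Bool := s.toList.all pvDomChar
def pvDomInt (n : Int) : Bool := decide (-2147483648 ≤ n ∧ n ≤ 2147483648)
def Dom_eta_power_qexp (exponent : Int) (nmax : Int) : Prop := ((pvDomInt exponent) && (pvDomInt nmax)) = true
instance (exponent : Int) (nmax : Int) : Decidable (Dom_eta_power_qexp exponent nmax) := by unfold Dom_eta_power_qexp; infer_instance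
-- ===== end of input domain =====

-- B re-implements eta_power_qexp by building prod(1-q^k) once and using binary
-- exponentiation on truncated series (plus one series inversion for negative
-- exponents) instead of A's |exponent| factor-by-factor passes.

-- ===== PORT A =====
-- shared initial list: coeffs = [0] * N; coeffs[0] = 1
def pvUnit (N : Nat) : List Int := PySem.List.pySetD (List.replicate N 0) 0 1

-- A: 'for m in range(nmax, k-1, -1): coeffs[m] -= coeffs[m-k]'
def pvSubLoop (k : Int) (nmax : Int) (c : List Int) : List Int :=
  (PySem.List.pyRange nmax (k - 1) (-1)).foldl
    (fun c m => PySem.List.pySetD c m (PySem.List.pyGetD c m 0 - PySem.List.pyGetD c (m - k) 0)) c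

-- A: 'for m in range(k, nmax+1): coeffs[m] += coeffs[m-k]'
def pvAddLoop (k : Int) (nmax : Int) (c : List Int) : List Int :=
  (PySem.List.pyRange k (nmax + 1) 1).foldl
    (fun c m => PySem.List.pySetD c m (PySem.List.pyGetD c m 0 + PySem.List.pyGetD c (m - k) 0)) c

def eta_power_qexp (exponent : Int) (nmax : Int) : List Int :=
  if exponent = 0 then
    pvUnit (nmax + 1).toNat
  else if exponent > 0 then
    (PySem.List.pyRange 1 (nmax + 1) 1).foldl
      (fun c k => (PySem.List.pyRange 0 exponent 1).foldl (fun c _ => pvSubLoop k nmax c) c)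
      (pvUnit (nmax + 1).toNat)
  else
    (PySem.List.pyRange 1 (nmax + 1) 1).foldl
      (fun c k => (PySem.List.pyRange 0 (-exponent) 1).foldl (fun c _ => pvAddLoop k nmax c) c)
      (pvUnit (nmax + 1).toNat)

-- ===== PORT B =====
-- B: 'E = [E[m] - (E[m-k] if m >= k else 0) for m in range(N)]'
def pvFactor (N : Nat) (k : Int) (E : List Int) : List Int :=
  (PySem.List.pyRange 0 (N : Int) 1).map
    (fun m => PySem.List.pyGetD E m 0 - if m ≥ k then PySem.List.pyGetD E (m - k) 0 else 0)

-- B: mul(a, b) — truncated Cauchy product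
def pvMul (N : Nat) (a b : List Int) : List Int :=
  (PySem.List.pyRange 0 (N : Int) 1).map
    (fun n => ((PySem.List.pyRange 0 (n + 1) 1).map
        (fun i => PySem.List.pyGetD a i 0 * PySem.List.pyGetD b (n - i) 0)).sum)

-- B: 'while e > 0: ...' — e stays ≥ 0 in Source B, so e is a Nat here (e % 2 and e // 2 coincide)
def pvPowLoop (N : Nat) (r base : List Int) (e : Nat) : List Int :=
  if e = 0 then r
  else pvPowLoop N (if e % 2 = 1 then pvMul N r base else r) (pvMul N base base) (e / 2)

-- B: 'for n in range(1, N): inv[n] = -sum(F[i] * inv[n-i] for i in range(1, n+1))'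
def pvInv (N : Nat) (F : List Int) : List Int :=
  (PySem.List.pyRange 1 (N : Int) 1).foldl
    (fun inv n => PySem.List.pySetD inv n
      (-((PySem.List.pyRange 1 (n + 1) 1).map
          (fun i => PySem.List.pyGetD F i 0 * PySem.List.pyGetD inv (n - i) 0)).sum))
    (pvUnit N)

def eta_power_qexp_alt (exponent : Int) (nmax : Int) : List Int :=
  let N := (nmax + 1).toNat
  if exponent = 0 then
    pvUnit N
  else
    let E := (PySem.List.pyRange 1 (nmax + 1) 1).foldl (fun E k => pvFactor N k E) (pvUnit N)
    if exponent ≥ 0 then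
      pvPowLoop N (pvUnit N) E exponent.toNat
    else
      pvInv N (pvPowLoop N (pvUnit N) E (-exponent).toNat)

-- ===== PRECONDITION & SPEC =====
-- Pre_ excludes exactly nmax < 0, where A (and B) raise IndexError on 'coeffs[0] = 1'.
def Pre_eta_power_qexp (exponent : Int) (nmax : Int) : Prop := 0 ≤ nmax
instance (exponent : Int) (nmax : Int) : Decidable (Pre_eta_power_qexp exponent nmax) := by
  unfold Pre_eta_power_qexp; infer_instance

def pvWitness_eta_power_qexp : Int × Int := (2, 3)

def Spec_eta_power_qexp (exponent : Int) (nmax : Int) (out : List Int) : Prop :=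
  out = eta_power_qexp_alt exponent nmax
instance (exponent : Int) (nmax : Int) (out : List Int) :
    Decidable (Spec_eta_power_qexp exponent nmax out) := by
  unfold Spec_eta_power_qexp; infer_instance

-- ===== CLAIM (what is proved, stated in full; the proofs are below) =====
def Claim_equal_eta_power_qexp : Prop := ∀ (exponent : Int) (nmax : Int),
  Dom_eta_power_qexp exponent nmax → Pre_eta_power_qexp exponent nmax →
    Spec_eta_power_qexp exponent nmax (eta_power_qexp exponent nmax)

-- ===== LEMMAS AND PROOFS =====
-- semantic map & agreement up to degree N
def pvSer (c : List Int) : PowerSeries ℤ := PowerSeries.mk (fun n => c.getD n 0)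
def pvAgree (N : Nat) (f g : PowerSeries ℤ) : Prop :=
  ∀ n : Nat, n < N → PowerSeries.coeff n f = PowerSeries.coeff n g

theorem pvAgree_refl (N : Nat) (f : PowerSeries ℤ) : pvAgree N f f := fun _ _ => rfl
theorem pvAgree_trans {N f g h} (h1 : pvAgree N f g) (h2 : pvAgree N g h) : pvAgree N f h :=
  fun n hn => (h1 n hn).trans (h2 n hn)
theorem pvAgree_symm {N f g} (h1 : pvAgree N f g) : pvAgree N g f := fun n hn => (h1 n hn).symm

theorem pvAgree_mul {N : Nat} {f f' g g' : PowerSeries ℤ}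
    (hf : pvAgree N f f') (hg : pvAgree N g g') : pvAgree N (f * g) (f' * g') := by
  intro n hn
  rw [PowerSeries.coeff_mul, PowerSeries.coeff_mul]
  refine Finset.sum_congr rfl ?_
  rintro ⟨i, j⟩ hij
  rw [Finset.mem_antidiagonal] at hij
  simp only
  rw [hf i (by omega), hg j (by omega)]

theorem pvAgree_pow {N : Nat} {f g : PowerSeries ℤ} (h : pvAgree N f g) (e : Nat) :
    pvAgree N (f ^ e) (g ^ e) := by
  induction e with
  | zero => simpa using pvAgree_refl N 1
  | succ e ih => rw [pow_succ, pow_succ]; exact pvAgree_mul ih h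

theorem pvAgree_cancel {N : Nat} {φ f g : PowerSeries ℤ}
    (hc : PowerSeries.constantCoeff φ = 1) (h : pvAgree N (φ * f) (φ * g)) : pvAgree N f g := by
  have hu : φ * PowerSeries.invOfUnit φ 1 = 1 := PowerSeries.mul_invOfUnit φ 1 (by simpa using hc)
  have h2 : pvAgree N (PowerSeries.invOfUnit φ 1 * (φ * f)) (PowerSeries.invOfUnit φ 1 * (φ * g)) :=
    pvAgree_mul (pvAgree_refl N _) h
  rw [← mul_assoc, ← mul_assoc, mul_comm (PowerSeries.invOfUnit φ 1) φ, hu, one_mul, one_mul] at h2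
  exact h2

theorem pvCoeff_ser (c : List Int) (n : Nat) : PowerSeries.coeff n (pvSer c) = c.getD n 0 :=
  PowerSeries.coeff_mk n _

theorem pvSum_map_range (m : Nat) (f : Nat → Int) :
    ((List.range m).map f).sum = ∑ i ∈ Finset.range m, f i := rfl

theorem pvCoeff_X_pow_mul_of_lt {n k : Nat} (h : n < k) (f : PowerSeries ℤ) :
    PowerSeries.coeff n (PowerSeries.X ^ k * f) = 0 := by
  rw [PowerSeries.coeff_mul]
  refine Finset.sum_eq_zero ?_
  rintro ⟨i, j⟩ hij
  rw [Finset.mem_antidiagonal] at hij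
  simp only
  rw [PowerSeries.coeff_X_pow]
  have : ¬ i = k := by omega
  simp [this]

theorem pvCoeff_one_sub_X_pow_mul (n k : Nat) (f : PowerSeries ℤ) :
    PowerSeries.coeff n ((1 - PowerSeries.X ^ k) * f)
      = PowerSeries.coeff n f - (if k ≤ n then PowerSeries.coeff (n - k) f else 0) := by
  rw [sub_mul, one_mul, map_sub]
  congr 1
  by_cases h : k ≤ n
  · rw [if_pos h]
    have hn : n = (n - k) + k := by omega
    conv_lhs => rw [hn]
    rw [PowerSeries.coeff_X_pow_mul]
  · rw [pvCoeff_X_pow_mul_of_lt (by omega), if_neg h]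

-- lists equal from lengths + getD
theorem pvList_eq {a b : List Int} (hl : a.length = b.length)
    (h : ∀ m : Nat, a.getD m 0 = b.getD m 0) : a = b := by
  apply List.ext_getElem hl
  intro i h1 h2
  have := h i
  rwa [List.getD_eq_getElem _ _ h1, List.getD_eq_getElem _ _ h2] at this

-- descending pyRange cons
theorem pvRange_neg_one_cons {a b : Int} (h : b < a) :
    PySem.List.pyRange a b (-1) = a :: PySem.List.pyRange (a - 1) b (-1) := by
  rw [PySem.List.pyRange_neg_one, PySem.List.pyRange_neg_one]
  have h1 : (a - b).toNat = (a - 1 - b).toNat + 1 := by omega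
  rw [h1, List.range_succ_eq_map, List.map_cons, List.map_map]
  congr 1
  · simp
  · apply List.map_congr_left
    intro x hx
    simp only [Function.comp_apply, Nat.succ_eq_add_one]
    push_cast
    ring

-- foldl ignoring elements = iterate
theorem pvFoldl_const {α β : Type} (f : α → α) (l : List β) (c : α) :
    l.foldl (fun c _ => f c) c = f^[l.length] c := by
  induction l generalizing c with
  | nil => rfl
  | cons x xs ih => simp [List.foldl_cons, ih, Function.iterate_succ_apply]
theorem pvUnit_eq (N : Nat) (h : 1 ≤ N) : pvUnit N = 1 :: List.replicate (N - 1) 0 := by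
  obtain ⟨M, rfl⟩ : ∃ M, N = M + 1 := ⟨N - 1, by omega⟩
  show PySem.List.pySetD (List.replicate (M + 1) 0) ((0 : Nat) : Int) 1 = _
  rw [PySem.List.pySetD_natCast]
  simp [List.replicate_succ]

theorem pvUnit_length (N : Nat) : (pvUnit N).length = N := by
  rw [pvUnit, PySem.List.length_pySetD, List.length_replicate]

theorem pvUnit_getD (N : Nat) (h : 1 ≤ N) (n : Nat) :
    (pvUnit N).getD n 0 = if n = 0 then 1 else 0 := by
  rw [pvUnit_eq N h]
  cases n with
  | zero => rfl
  | succ m => simp [List.getD]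

theorem pvSer_unit (N : Nat) (h : 1 ≤ N) : pvAgree N (pvSer (pvUnit N)) 1 := by
  intro n hn
  rw [pvCoeff_ser, pvUnit_getD N h, PowerSeries.coeff_one]

-- pvMul
theorem pvMul_length (N : Nat) (a b : List Int) : (pvMul N a b).length = N := by
  rw [pvMul, List.length_map, PySem.List.length_pyRange_one]; omega

theorem pvMul_getD (N : Nat) (a b : List Int) (n : Nat) (hn : n < N) :
    (pvMul N a b).getD n 0 = ∑ i ∈ Finset.range (n + 1), a.getD i 0 * b.getD (n - i) 0 := by
  rw [pvMul, PySem.List.pyRange_zero_natCast, List.map_map, PySem.List.getD_map_range _ _ _ _ hn]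
  simp only [Function.comp_apply]
  have h1 : ((n : Int) + 1) = ((n + 1 : Nat) : Int) := by push_cast; ring
  rw [h1, PySem.List.pyRange_zero_natCast, List.map_map, ← pvSum_map_range]
  congr 1
  apply List.map_congr_left
  intro i hi
  rw [List.mem_range] at hi
  simp only [Function.comp_apply]
  rw [PySem.List.pyGetD_natCast]
  have h2 : ((n : Int) - (i : Int)) = ((n - i : Nat) : Int) := by omega
  rw [h2, PySem.List.pyGetD_natCast]

theorem pvSer_mul (N : Nat) (a b : List Int) :
    pvAgree N (pvSer (pvMul N a b)) (pvSer a * pvSer b) := by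
  intro n hn
  rw [pvCoeff_ser, pvMul_getD N a b n hn, PowerSeries.coeff_mul,
    Finset.Nat.sum_antidiagonal_eq_sum_range_succ_mk]
  refine Finset.sum_congr rfl ?_
  intro i _
  rw [pvCoeff_ser, pvCoeff_ser]

-- pvFactor
theorem pvFactor_length (N : Nat) (k : Int) (E : List Int) : (pvFactor N k E).length = N := by
  rw [pvFactor, List.length_map, PySem.List.length_pyRange_one]; omega

theorem pvFactor_getD (N : Nat) (k : Int) (E : List Int) (n : Nat) (hn : n < N) :
    (pvFactor N k E).getD n 0
      = E.getD n 0 - (if k ≤ (n : Int) then E.getD ((n : Int) - k).toNat 0 else 0) := by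
  rw [pvFactor, PySem.List.pyRange_zero_natCast, List.map_map, PySem.List.getD_map_range _ _ _ _ hn]
  simp only [Function.comp_apply, ge_iff_le]
  rw [PySem.List.pyGetD_natCast]
  by_cases h : k ≤ (n : Int)
  · rw [if_pos h, if_pos h, PySem.List.pyGetD_of_nonneg _ _ (by omega)]
  · rw [if_neg h, if_neg h]

theorem pvSer_factor (N : Nat) (k : Int) (hk : 1 ≤ k) (E : List Int) :
    pvAgree N (pvSer (pvFactor N k E)) ((1 - PowerSeries.X ^ k.toNat) * pvSer E) := by
  intro n hn
  rw [pvCoeff_ser, pvFactor_getD N k E n hn, pvCoeff_one_sub_X_pow_mul]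
  rw [pvCoeff_ser, pvCoeff_ser]
  by_cases h : k.toNat ≤ n
  · rw [if_pos h, if_pos (by omega)]
    congr 2
    omega
  · rw [if_neg h, if_neg (by omega)]
theorem pvRange_neg_one_nil {a b : Int} (h : a ≤ b) : PySem.List.pyRange a b (-1) = [] := by
  rw [PySem.List.pyRange_neg_one]
  have : (a - b).toNat = 0 := by omega
  simp [this]

theorem pvGetD_setD (c : List Int) (H : Nat) (hH : H < c.length) (v : Int) (m : Nat) :
    (PySem.List.pySetD c (H : Int) v).getD m 0 = if m = H then v else c.getD m 0 := by
  have h := PySem.List.pyGetD_pySetD_natCast c H m v 0 hH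
  rwa [PySem.List.pyGetD_natCast, PySem.List.pyGetD_natCast] at h

theorem pvSubFold (k : Int) (hk : 1 ≤ k) (d : Nat) :
    ∀ (hi lo : Int) (c : List Int), (hi - lo).toNat = d → k - 1 ≤ lo → hi < (c.length : Int) →
    ((PySem.List.pyRange hi lo (-1)).foldl
        (fun c m => PySem.List.pySetD c m
          (PySem.List.pyGetD c m 0 - PySem.List.pyGetD c (m - k) 0)) c).length = c.length ∧
    ∀ m : Nat, ((PySem.List.pyRange hi lo (-1)).foldl
        (fun c m => PySem.List.pySetD c m
          (PySem.List.pyGetD c m 0 - PySem.List.pyGetD c (m - k) 0)) c).getD m 0 =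
      if lo < (m : Int) ∧ (m : Int) ≤ hi then c.getD m 0 - c.getD ((m : Int) - k).toNat 0
      else c.getD m 0 := by
  induction d with
  | zero =>
    intro hi lo c hd hlo hhi
    rw [pvRange_neg_one_nil (by omega)]
    exact ⟨rfl, fun m => by rw [if_neg (by omega)]; rfl⟩
  | succ d ih =>
    intro hi lo c hd hlo hhi
    have hlt : lo < hi := by omega
    have h0 : (0 : Int) ≤ hi := by omega
    rw [pvRange_neg_one_cons hlt, List.foldl_cons]
    set v := PySem.List.pyGetD c hi 0 - PySem.List.pyGetD c (hi - k) 0 with hv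
    set c1 := PySem.List.pySetD c hi v with hc1
    have hlen1 : c1.length = c.length := PySem.List.length_pySetD c hi v
    have hicast : hi = ((hi.toNat : Nat) : Int) := by omega
    have hvval : v = c.getD hi.toNat 0 - c.getD (hi - k).toNat 0 := by
      rw [hv, PySem.List.pyGetD_of_nonneg _ _ h0, PySem.List.pyGetD_of_nonneg _ _ (by omega)]
    have hc1getD : ∀ m : Nat, c1.getD m 0 = if m = hi.toNat then v else c.getD m 0 := by
      intro m
      rw [hc1, hicast]
      exact pvGetD_setD c hi.toNat (by omega) v m
    obtain ⟨ihlen, ihgetD⟩ := ih (hi - 1) lo c1 (by omega) hlo (by omega)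
    refine ⟨by rw [ihlen, hlen1], ?_⟩
    intro m
    rw [ihgetD m]
    by_cases hm1 : lo < (m : Int) ∧ (m : Int) ≤ hi - 1
    · rw [if_pos hm1, if_pos (by omega)]
      rw [hc1getD, hc1getD, if_neg (by omega), if_neg (by omega)]
    · by_cases hm2 : (m : Int) = hi
      · rw [if_neg hm1, if_pos (by omega), hc1getD, if_pos (by omega), hvval]
        congr 2 <;> omega
      · rw [if_neg hm1, if_neg (by omega), hc1getD, if_neg (by omega)]

theorem pvAddFold (k : Int) (hk : 1 ≤ k) (d : Nat) :
    ∀ (lo b : Int) (c : List Int), (b - lo).toNat = d → k ≤ lo → b ≤ (c.length : Int) →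
    ((PySem.List.pyRange lo b 1).foldl
        (fun c m => PySem.List.pySetD c m
          (PySem.List.pyGetD c m 0 + PySem.List.pyGetD c (m - k) 0)) c).length = c.length ∧
    (∀ m : Nat, ((m : Int) < lo ∨ b ≤ (m : Int)) →
      ((PySem.List.pyRange lo b 1).foldl
        (fun c m => PySem.List.pySetD c m
          (PySem.List.pyGetD c m 0 + PySem.List.pyGetD c (m - k) 0)) c).getD m 0 = c.getD m 0) ∧
    (∀ m : Nat, lo ≤ (m : Int) → (m : Int) < b →
      ((PySem.List.pyRange lo b 1).foldl
        (fun c m => PySem.List.pySetD c m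
          (PySem.List.pyGetD c m 0 + PySem.List.pyGetD c (m - k) 0)) c).getD m 0 =
        c.getD m 0 + ((PySem.List.pyRange lo b 1).foldl
        (fun c m => PySem.List.pySetD c m
          (PySem.List.pyGetD c m 0 + PySem.List.pyGetD c (m - k) 0)) c).getD (m - k.toNat) 0) := by
  induction d with
  | zero =>
    intro lo b c hd hlo hb
    rw [PySem.List.pyRange_one_eq_nil (by omega)]
    exact ⟨rfl, fun m _ => rfl, fun m h1 h2 => by omega⟩
  | succ d ih =>
    intro lo b c hd hlo hb
    have hlt : lo < b := by omega
    rw [PySem.List.pyRange_one_cons hlt, List.foldl_cons]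
    set v := PySem.List.pyGetD c lo 0 + PySem.List.pyGetD c (lo - k) 0 with hv
    set c1 := PySem.List.pySetD c lo v with hc1
    have hlen1 : c1.length = c.length := PySem.List.length_pySetD c lo v
    have hlocast : lo = ((lo.toNat : Nat) : Int) := by omega
    have hvval : v = c.getD lo.toNat 0 + c.getD (lo - k).toNat 0 := by
      rw [hv, PySem.List.pyGetD_of_nonneg _ _ (by omega),
        PySem.List.pyGetD_of_nonneg _ _ (by omega)]
    have hc1getD : ∀ m : Nat, c1.getD m 0 = if m = lo.toNat then v else c.getD m 0 := by
      intro m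
      rw [hc1, hlocast]
      exact pvGetD_setD c lo.toNat (by omega) v m
    obtain ⟨ihlen, ihout, ihin⟩ := ih (lo + 1) b c1 (by omega) (by omega) (by omega)
    refine ⟨by rw [ihlen, hlen1], ?_, ?_⟩
    · intro m hm
      rw [ihout m (by omega), hc1getD, if_neg (by omega)]
    · intro m hm1 hm2
      by_cases hme : (m : Int) = lo
      · rw [ihout m (by omega), hc1getD, if_pos (by omega), hvval,
          ihout (m - k.toNat) (by omega), hc1getD, if_neg (by omega)]
        congr 2 <;> omega
      · rw [ihin m (by omega) hm2, hc1getD, if_neg (by omega)]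
-- pvSubLoop / pvAddLoop specs (c of length nmax+1, 1 ≤ k, 0 ≤ nmax)
theorem pvSubLoop_length (k nmax : Int) (hk : 1 ≤ k) (hn : 0 ≤ nmax) (c : List Int)
    (hc : c.length = (nmax + 1).toNat) : (pvSubLoop k nmax c).length = c.length :=
  (pvSubFold k hk (nmax - (k - 1)).toNat nmax (k - 1) c rfl (by omega) (by omega)).1

theorem pvSubLoop_getD (k nmax : Int) (hk : 1 ≤ k) (hn : 0 ≤ nmax) (c : List Int)
    (hc : c.length = (nmax + 1).toNat) (m : Nat) :
    (pvSubLoop k nmax c).getD m 0 =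
      if k - 1 < (m : Int) ∧ (m : Int) ≤ nmax then c.getD m 0 - c.getD ((m : Int) - k).toNat 0
      else c.getD m 0 :=
  (pvSubFold k hk (nmax - (k - 1)).toNat nmax (k - 1) c rfl (by omega) (by omega)).2 m

theorem pvSer_subLoop (k nmax : Int) (hk : 1 ≤ k) (hn : 0 ≤ nmax) (c : List Int)
    (hc : c.length = (nmax + 1).toNat) :
    pvAgree (nmax + 1).toNat (pvSer (pvSubLoop k nmax c))
      ((1 - PowerSeries.X ^ k.toNat) * pvSer c) := by
  intro n hnlt
  rw [pvCoeff_ser, pvSubLoop_getD k nmax hk hn c hc n, pvCoeff_one_sub_X_pow_mul,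
    pvCoeff_ser, pvCoeff_ser]
  by_cases h : k.toNat ≤ n
  · rw [if_pos (by omega), if_pos h]
    congr 2
    omega
  · rw [if_neg (by omega), if_neg h]
    ring

theorem pvAddLoop_length (k nmax : Int) (hk : 1 ≤ k) (hn : 0 ≤ nmax) (c : List Int)
    (hc : c.length = (nmax + 1).toNat) : (pvAddLoop k nmax c).length = c.length :=
  (pvAddFold k hk (nmax + 1 - k).toNat k (nmax + 1) c rfl (by omega) (by omega)).1

theorem pvSubLoop_addLoop (k nmax : Int) (hk : 1 ≤ k) (hn : 0 ≤ nmax) (c : List Int)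
    (hc : c.length = (nmax + 1).toNat) : pvSubLoop k nmax (pvAddLoop k nmax c) = c := by
  have hrlen : (pvAddLoop k nmax c).length = c.length :=
    pvAddLoop_length k nmax hk hn c hc
  obtain ⟨_, hout, hin⟩ := pvAddFold k hk (nmax + 1 - k).toNat k (nmax + 1) c rfl
    (by omega) (by omega)
  apply pvList_eq ((pvSubLoop_length k nmax hk hn _ (hrlen.trans hc)).trans hrlen)
  intro m
  rw [pvSubLoop_getD k nmax hk hn _ (hrlen.trans hc) m]
  simp only [pvAddLoop]
  by_cases h : k - 1 < (m : Int) ∧ (m : Int) ≤ nmax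
  · rw [if_pos h, hin m (by omega) (by omega)]
    have : ((m : Int) - k).toNat = m - k.toNat := by omega
    rw [this]
    ring
  · rw [if_neg h, hout m (by omega)]

-- iterates
theorem pvSubIter (k nmax : Int) (hk : 1 ≤ k) (hn : 0 ≤ nmax) (e : Nat) :
    ∀ c : List Int, c.length = (nmax + 1).toNat →
      ((pvSubLoop k nmax)^[e] c).length = (nmax + 1).toNat ∧
      pvAgree (nmax + 1).toNat (pvSer ((pvSubLoop k nmax)^[e] c))
        ((1 - PowerSeries.X ^ k.toNat) ^ e * pvSer c) := by
  induction e with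
  | zero =>
    intro c hc
    refine ⟨hc, ?_⟩
    simp only [Function.iterate_zero, id_eq, pow_zero, one_mul]
    exact pvAgree_refl _ _
  | succ e ih =>
    intro c hc
    obtain ⟨ihl, ihs⟩ := ih c hc
    rw [Function.iterate_succ_apply']
    refine ⟨(pvSubLoop_length k nmax hk hn _ ihl).trans ihl, ?_⟩
    refine pvAgree_trans (pvSer_subLoop k nmax hk hn _ ihl) ?_
    refine pvAgree_trans (pvAgree_mul (pvAgree_refl _ _) ihs) ?_
    rw [← mul_assoc, ← pow_succ']
    exact pvAgree_refl _ _

theorem pvAddIter_length (k nmax : Int) (hk : 1 ≤ k) (hn : 0 ≤ nmax) (e : Nat) :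
    ∀ c : List Int, c.length = (nmax + 1).toNat →
      ((pvAddLoop k nmax)^[e] c).length = (nmax + 1).toNat := by
  induction e with
  | zero => intro c hc; simpa using hc
  | succ e ih =>
    intro c hc
    rw [Function.iterate_succ_apply']
    rw [pvAddLoop_length k nmax hk hn _ (ih c hc)]
    exact ih c hc

theorem pvSubIter_addIter (k nmax : Int) (hk : 1 ≤ k) (hn : 0 ≤ nmax) (e : Nat) :
    ∀ c : List Int, c.length = (nmax + 1).toNat →
      (pvSubLoop k nmax)^[e] ((pvAddLoop k nmax)^[e] c) = c := by
  induction e with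
  | zero => intro c _; simp
  | succ e ih =>
    intro c hc
    rw [Function.iterate_succ_apply' (pvSubLoop k nmax),
      Function.iterate_succ_apply (pvAddLoop k nmax),
      ih (pvAddLoop k nmax c) ((pvAddLoop_length k nmax hk hn c hc).trans hc),
      pvSubLoop_addLoop k nmax hk hn c hc]
noncomputable def pvPhi (ks : List Int) : PowerSeries ℤ :=
  (ks.map (fun k => 1 - PowerSeries.X ^ k.toNat)).prod

theorem pvPhi_nil : pvPhi [] = 1 := rfl
theorem pvPhi_cons (k : Int) (ks : List Int) :
    pvPhi (k :: ks) = (1 - PowerSeries.X ^ k.toNat) * pvPhi ks := by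
  rw [pvPhi, List.map_cons, List.prod_cons, pvPhi]

theorem pvPhi_constCoeff (ks : List Int) (h : ∀ k ∈ ks, 1 ≤ k) :
    PowerSeries.constantCoeff (pvPhi ks) = 1 := by
  induction ks with
  | nil => rw [pvPhi_nil]; exact map_one _
  | cons k ks ih =>
    rw [pvPhi_cons, map_mul, ih (fun x hx => h x (List.mem_cons_of_mem _ hx)), mul_one,
      map_sub, map_one, map_pow, PowerSeries.constantCoeff_X,
      zero_pow (by have := h k List.mem_cons_self; omega), sub_zero]

-- A, positive branch: fold of iterated pvSubLoop over ks
theorem pvAFoldSer (nmax : Int) (hn : 0 ≤ nmax) (e : Nat) :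
    ∀ (ks : List Int), (∀ k ∈ ks, 1 ≤ k) → ∀ c : List Int, c.length = (nmax + 1).toNat →
      (ks.foldl (fun c k => (pvSubLoop k nmax)^[e] c) c).length = (nmax + 1).toNat ∧
      pvAgree (nmax + 1).toNat (pvSer (ks.foldl (fun c k => (pvSubLoop k nmax)^[e] c) c))
        (pvPhi ks ^ e * pvSer c) := by
  intro ks
  induction ks with
  | nil =>
    intro _ c hc
    refine ⟨hc, ?_⟩
    rw [pvPhi_nil, one_pow, one_mul]
    exact pvAgree_refl _ _
  | cons k ks ih =>
    intro hks c hc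
    have hk : 1 ≤ k := hks k List.mem_cons_self
    obtain ⟨hl1, hs1⟩ := pvSubIter k nmax hk hn e c hc
    rw [List.foldl_cons]
    obtain ⟨ihl, ihs⟩ := ih (fun x hx => hks x (List.mem_cons_of_mem _ hx)) _ hl1
    refine ⟨ihl, ?_⟩
    refine pvAgree_trans ihs ?_
    refine pvAgree_trans (pvAgree_mul (pvAgree_refl _ _) hs1) ?_
    rw [pvPhi_cons, mul_pow, ← mul_assoc, mul_comm (pvPhi ks ^ e), mul_assoc]
    exact pvAgree_refl _ _

-- A, negative branch: foldr of iterated pvSubLoop undoes foldl of iterated pvAddLoop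
theorem pvAddFoldl_length (nmax : Int) (hn : 0 ≤ nmax) (e : Nat) :
    ∀ (ks : List Int), (∀ k ∈ ks, 1 ≤ k) → ∀ c : List Int, c.length = (nmax + 1).toNat →
      (ks.foldl (fun c k => (pvAddLoop k nmax)^[e] c) c).length = (nmax + 1).toNat := by
  intro ks
  induction ks with
  | nil => intro _ c hc; exact hc
  | cons k ks ih =>
    intro hks c hc
    rw [List.foldl_cons]
    exact ih (fun x hx => hks x (List.mem_cons_of_mem _ hx)) _
      (pvAddIter_length k nmax (hks k List.mem_cons_self) hn e c hc)

theorem pvFoldr_undoes (nmax : Int) (hn : 0 ≤ nmax) (e : Nat) :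
    ∀ (ks : List Int), (∀ k ∈ ks, 1 ≤ k) → ∀ c : List Int, c.length = (nmax + 1).toNat →
      ks.foldr (fun k c => (pvSubLoop k nmax)^[e] c)
        (ks.foldl (fun c k => (pvAddLoop k nmax)^[e] c) c) = c := by
  intro ks
  induction ks with
  | nil => intro _ c _; rfl
  | cons k ks ih =>
    intro hks c hc
    have hk : 1 ≤ k := hks k List.mem_cons_self
    rw [List.foldl_cons, List.foldr_cons,
      ih (fun x hx => hks x (List.mem_cons_of_mem _ hx)) _
        (pvAddIter_length k nmax hk hn e c hc),
      pvSubIter_addIter k nmax hk hn e c hc]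

theorem pvFoldrSubSer (nmax : Int) (hn : 0 ≤ nmax) (e : Nat) :
    ∀ (ks : List Int), (∀ k ∈ ks, 1 ≤ k) → ∀ y : List Int, y.length = (nmax + 1).toNat →
      (ks.foldr (fun k c => (pvSubLoop k nmax)^[e] c) y).length = (nmax + 1).toNat ∧
      pvAgree (nmax + 1).toNat (pvSer (ks.foldr (fun k c => (pvSubLoop k nmax)^[e] c) y))
        (pvPhi ks ^ e * pvSer y) := by
  intro ks
  induction ks with
  | nil =>
    intro _ y hy
    refine ⟨hy, ?_⟩
    rw [pvPhi_nil, one_pow, one_mul]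
    exact pvAgree_refl _ _
  | cons k ks ih =>
    intro hks y hy
    have hk : 1 ≤ k := hks k List.mem_cons_self
    rw [List.foldr_cons]
    obtain ⟨ihl, ihs⟩ := ih (fun x hx => hks x (List.mem_cons_of_mem _ hx)) y hy
    obtain ⟨hl1, hs1⟩ := pvSubIter k nmax hk hn e _ ihl
    refine ⟨hl1, ?_⟩
    refine pvAgree_trans hs1 ?_
    refine pvAgree_trans (pvAgree_mul (pvAgree_refl _ _) ihs) ?_
    rw [pvPhi_cons, mul_pow, ← mul_assoc]
    exact pvAgree_refl _ _

-- B: fold of pvFactor over ks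
theorem pvBFoldSer (N : Nat) :
    ∀ (ks : List Int), (∀ k ∈ ks, 1 ≤ k) → ∀ c : List Int,
      (ks.foldl (fun E k => pvFactor N k E) c).length = (if ks = [] then c.length else N) ∧
      pvAgree N (pvSer (ks.foldl (fun E k => pvFactor N k E) c)) (pvPhi ks * pvSer c) := by
  intro ks
  induction ks with
  | nil =>
    intro _ c
    refine ⟨by simp, ?_⟩
    rw [pvPhi_nil, one_mul]
    exact pvAgree_refl _ _
  | cons k ks ih =>
    intro hks c
    have hk : 1 ≤ k := hks k List.mem_cons_self
    rw [List.foldl_cons]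
    obtain ⟨ihl, ihs⟩ := ih (fun x hx => hks x (List.mem_cons_of_mem _ hx)) (pvFactor N k c)
    constructor
    · rw [ihl]
      split
      · exact pvFactor_length N k c
      · rfl
    · refine pvAgree_trans ihs ?_
      refine pvAgree_trans (pvAgree_mul (pvAgree_refl _ _) (pvSer_factor N k hk c)) ?_
      rw [pvPhi_cons, ← mul_assoc, mul_comm (pvPhi ks), mul_assoc]
      exact pvAgree_refl _ _

-- pvPowLoop
theorem pvPowLoop_length (N : Nat) :
    ∀ (e : Nat) (r base : List Int), r.length = N → (pvPowLoop N r base e).length = N := by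
  intro e
  induction e using Nat.strong_induction_on with
  | _ e ih =>
    intro r base hr
    rw [pvPowLoop]
    split
    · exact hr
    · refine ih (e / 2) (by omega) _ _ ?_
      split
      · exact pvMul_length N r base
      · exact hr

theorem pvPowLoop_ser (N : Nat) :
    ∀ (e : Nat) (r base : List Int),
      pvAgree N (pvSer (pvPowLoop N r base e)) (pvSer r * pvSer base ^ e) := by
  intro e
  induction e using Nat.strong_induction_on with
  | _ e ih =>
    intro r base
    rw [pvPowLoop]
    split
    · next he =>
      subst he
      rw [pow_zero, mul_one]
      exact pvAgree_refl _ _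
    · next he =>
      refine pvAgree_trans (ih (e / 2) (by omega) _ _) ?_
      have hbase : pvAgree N (pvSer (pvMul N base base)) (pvSer base * pvSer base) :=
        pvSer_mul N base base
      have hr : pvAgree N (pvSer (if e % 2 = 1 then pvMul N r base else r))
          (pvSer r * pvSer base ^ (e % 2)) := by
        split
        · next h2 => rw [h2, pow_one]; exact pvSer_mul N r base
        · next h2 =>
          have : e % 2 = 0 := by omega
          rw [this, pow_zero, mul_one]
          exact pvAgree_refl _ _
      refine pvAgree_trans (pvAgree_mul hr (pvAgree_pow hbase (e / 2))) ?_
      have hE : pvSer r * pvSer base ^ (e % 2) * (pvSer base * pvSer base) ^ (e / 2)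
          = pvSer r * pvSer base ^ e := by
        rw [← sq, ← pow_mul, mul_assoc, ← pow_add]
        congr 2
        omega
      rw [hE]
      exact pvAgree_refl _ _
-- pvInv fold characterisation
theorem pvInvFoldAux (F : List Int) (d : Nat) :
    ∀ (lo b : Int) (c : List Int), (b - lo).toNat = d → 1 ≤ lo → b ≤ (c.length : Int) →
    ((PySem.List.pyRange lo b 1).foldl
        (fun inv n => PySem.List.pySetD inv n
          (-((PySem.List.pyRange 1 (n + 1) 1).map
              (fun i => PySem.List.pyGetD F i 0 * PySem.List.pyGetD inv (n - i) 0)).sum)) c).length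
      = c.length ∧
    (∀ m : Nat, ((m : Int) < lo ∨ b ≤ (m : Int)) →
      ((PySem.List.pyRange lo b 1).foldl
        (fun inv n => PySem.List.pySetD inv n
          (-((PySem.List.pyRange 1 (n + 1) 1).map
              (fun i => PySem.List.pyGetD F i 0 * PySem.List.pyGetD inv (n - i) 0)).sum)) c).getD m 0
        = c.getD m 0) ∧
    (∀ m : Nat, lo ≤ (m : Int) → (m : Int) < b →
      ((PySem.List.pyRange lo b 1).foldl
        (fun inv n => PySem.List.pySetD inv n
          (-((PySem.List.pyRange 1 (n + 1) 1).map
              (fun i => PySem.List.pyGetD F i 0 * PySem.List.pyGetD inv (n - i) 0)).sum)) c).getD m 0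
        = -((PySem.List.pyRange 1 ((m : Int) + 1) 1).map
              (fun i => PySem.List.pyGetD F i 0 *
                PySem.List.pyGetD ((PySem.List.pyRange lo b 1).foldl
                  (fun inv n => PySem.List.pySetD inv n
                    (-((PySem.List.pyRange 1 (n + 1) 1).map
                      (fun i => PySem.List.pyGetD F i 0 * PySem.List.pyGetD inv (n - i) 0)).sum)) c)
                  ((m : Int) - i) 0)).sum) := by
  induction d with
  | zero =>
    intro lo b c hd hlo hb
    rw [PySem.List.pyRange_one_eq_nil (by omega)]
    exact ⟨rfl, fun m _ => rfl, fun m h1 h2 => by omega⟩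
  | succ d ih =>
    intro lo b c hd hlo hb
    have hlt : lo < b := by omega
    rw [PySem.List.pyRange_one_cons hlt, List.foldl_cons]
    set w := -((PySem.List.pyRange 1 (lo + 1) 1).map
      (fun i => PySem.List.pyGetD F i 0 * PySem.List.pyGetD c (lo - i) 0)).sum with hw
    set c1 := PySem.List.pySetD c lo w with hc1
    have hlen1 : c1.length = c.length := PySem.List.length_pySetD c lo w
    have hlocast : lo = ((lo.toNat : Nat) : Int) := by omega
    have hc1getD : ∀ m : Nat, c1.getD m 0 = if m = lo.toNat then w else c.getD m 0 := by
      intro m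
      rw [hc1, hlocast]
      exact pvGetD_setD c lo.toNat (by omega) w m
    obtain ⟨ihlen, ihout, ihin⟩ := ih (lo + 1) b c1 (by omega) (by omega) (by omega)
    refine ⟨by rw [ihlen, hlen1], ?_, ?_⟩
    · intro m hm
      rw [ihout m (by omega), hc1getD, if_neg (by omega)]
    · intro m hm1 hm2
      by_cases hme : (m : Int) = lo
      · rw [ihout m (by omega), hc1getD, if_pos (by omega), hw, hme]
        congr 1
        refine congrArg List.sum (List.map_congr_left ?_)
        intro i hi
        rw [PySem.List.mem_pyRange_one] at hi
        congr 1
        rw [PySem.List.pyGetD_of_nonneg _ _ (by omega),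
          PySem.List.pyGetD_of_nonneg _ _ (by omega),
          ihout ((lo - i).toNat) (by omega), hc1getD, if_neg (by omega)]
      · rw [ihin m (by omega) hm2]

theorem pvInv_spec (N : Nat) (hN : 1 ≤ N) (F : List Int) :
    (pvInv N F).length = N ∧ (pvInv N F).getD 0 0 = 1 ∧
    (∀ m : Nat, 1 ≤ m → m < N →
      (pvInv N F).getD m 0 =
        -((PySem.List.pyRange 1 ((m : Int) + 1) 1).map
          (fun i => PySem.List.pyGetD F i 0 * PySem.List.pyGetD (pvInv N F) ((m : Int) - i) 0)).sum) := by
  obtain ⟨hl, hout, hin⟩ := pvInvFoldAux F ((N : Int) - 1).toNat 1 (N : Int) (pvUnit N) rfl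
    (by omega) (by rw [pvUnit_length])
  rw [pvInv]
  refine ⟨hl.trans (pvUnit_length N), ?_, ?_⟩
  · rw [hout 0 (by omega), pvUnit_getD N hN 0, if_pos rfl]
  · intro m h1 h2
    exact hin m (by omega) (by omega)
theorem pvInv_sum_eq (F z : List Int) (n : Nat) :
    ((PySem.List.pyRange 1 ((n : Int) + 1) 1).map
      (fun i => PySem.List.pyGetD F i 0 * PySem.List.pyGetD z ((n : Int) - i) 0)).sum
    = ∑ j ∈ Finset.range n, F.getD (j + 1) 0 * z.getD (n - (j + 1)) 0 := by
  rw [PySem.List.pyRange_one, List.map_map, ← pvSum_map_range]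
  have h1 : ((n : Int) + 1 - 1).toNat = n := by omega
  rw [h1]
  congr 1
  apply List.map_congr_left
  intro j hj
  rw [List.mem_range] at hj
  simp only [Function.comp_apply]
  have h2 : (1 : Int) + (j : Int) = ((j + 1 : Nat) : Int) := by push_cast; ring
  rw [h2, PySem.List.pyGetD_natCast]
  have h3 : (n : Int) - ((j + 1 : Nat) : Int) = ((n - (j + 1) : Nat) : Int) := by omega
  rw [h3, PySem.List.pyGetD_natCast]

theorem pvSer_F_inv (N : Nat) (hN : 1 ≤ N) (F : List Int) (hF0 : F.getD 0 0 = 1) :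
    pvAgree N (pvSer F * pvSer (pvInv N F)) 1 := by
  obtain ⟨hl, h0, hrec⟩ := pvInv_spec N hN F
  intro n hn
  rw [PowerSeries.coeff_mul, Finset.Nat.sum_antidiagonal_eq_sum_range_succ_mk,
    PowerSeries.coeff_one]
  simp only [pvCoeff_ser]
  cases n with
  | zero => rw [if_pos rfl, Finset.sum_range_one, Nat.sub_zero, hF0, h0, one_mul]
  | succ m =>
    rw [if_neg (by omega), Finset.sum_range_succ']
    have hz : (pvInv N F).getD (m + 1) 0
        = -∑ j ∈ Finset.range (m + 1), F.getD (j + 1) 0 * (pvInv N F).getD (m + 1 - (j + 1)) 0 := by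
      rw [hrec (m + 1) (by omega) hn, pvInv_sum_eq]
    simp only [Nat.sub_zero, hF0, one_mul]
    rw [hz]
    simp [Nat.succ_sub_succ]
theorem pvList_eq_of_agree {a b : List Int} (N : Nat) (ha : a.length = N) (hb : b.length = N)
    (h : pvAgree N (pvSer a) (pvSer b)) : a = b := by
  apply pvList_eq (ha.trans hb.symm)
  intro m
  by_cases hm : m < N
  · have := h m hm
    rwa [pvCoeff_ser, pvCoeff_ser] at this
  · rw [List.getD_eq_default _ _ (by omega), List.getD_eq_default _ _ (by omega)]

theorem pvMain (exponent nmax : Int) (hn : 0 ≤ nmax) :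
    eta_power_qexp exponent nmax = eta_power_qexp_alt exponent nmax := by
  have hN : 1 ≤ (nmax + 1).toNat := by omega
  set N := (nmax + 1).toNat with hNdef
  set ks := PySem.List.pyRange 1 (nmax + 1) 1 with hksdef
  have hks : ∀ k ∈ ks, 1 ≤ k := by
    intro k hk
    rw [hksdef, PySem.List.mem_pyRange_one] at hk
    omega
  set E := ks.foldl (fun E k => pvFactor N k E) (pvUnit N) with hEdef
  obtain ⟨hEl0, hEs0⟩ := pvBFoldSer N ks hks (pvUnit N)
  have hElen : E.length = N := by
    rw [hEdef, hEl0]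
    split
    · exact pvUnit_length N
    · rfl
  have hEser : pvAgree N (pvSer E) (pvPhi ks) := by
    refine pvAgree_trans hEs0 ?_
    have h1 := pvAgree_mul (pvAgree_refl N (pvPhi ks)) (pvSer_unit N hN)
    rwa [mul_one] at h1
  have hBdef : eta_power_qexp_alt exponent nmax =
      (if exponent = 0 then pvUnit N
       else if exponent ≥ 0 then pvPowLoop N (pvUnit N) E exponent.toNat
       else pvInv N (pvPowLoop N (pvUnit N) E (-exponent).toNat)) := rfl
  rcases lt_trichotomy exponent 0 with hneg | h0 | hpos
  · -- negative exponent
    set e := (-exponent).toNat with hedef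
    have hbody : (fun (c : List Int) (k : Int) =>
        (PySem.List.pyRange 0 (-exponent) 1).foldl (fun c _ => pvAddLoop k nmax c) c)
        = (fun (c : List Int) (k : Int) => (pvAddLoop k nmax)^[e] c) := by
      funext c k
      rw [pvFoldl_const, PySem.List.length_pyRange_one]
      norm_num
      rfl
    have hAdef : eta_power_qexp exponent nmax =
        ks.foldl (fun c k => (pvAddLoop k nmax)^[e] c) (pvUnit N) := by
      rw [eta_power_qexp, if_neg (by omega), if_neg (by omega), hbody]
    set y := ks.foldl (fun c k => (pvAddLoop k nmax)^[e] c) (pvUnit N) with hydef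
    have hylen : y.length = N := pvAddFoldl_length nmax hn e ks hks (pvUnit N) (pvUnit_length N)
    have hundo := pvFoldr_undoes nmax hn e ks hks (pvUnit N) (pvUnit_length N)
    obtain ⟨hfl, hfs⟩ := pvFoldrSubSer nmax hn e ks hks y hylen
    rw [← hydef] at hundo
    rw [hundo] at hfs
    have hA : pvAgree N (pvPhi ks ^ e * pvSer y) 1 :=
      pvAgree_trans (pvAgree_symm hfs) (pvSer_unit N hN)
    set F := pvPowLoop N (pvUnit N) E e with hFdef
    have hFl : F.length = N := pvPowLoop_length N e _ _ (pvUnit_length N)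
    have hFs : pvAgree N (pvSer F) (pvPhi ks ^ e) := by
      refine pvAgree_trans (pvPowLoop_ser N e (pvUnit N) E) ?_
      have h1 := pvAgree_mul (pvSer_unit N hN) (pvAgree_pow hEser e)
      rwa [one_mul] at h1
    have hF0 : F.getD 0 0 = 1 := by
      have h1 := hFs 0 (by omega)
      rw [pvCoeff_ser, PowerSeries.coeff_zero_eq_constantCoeff, map_pow,
        pvPhi_constCoeff ks hks, one_pow] at h1
      exact h1
    have hz := pvSer_F_inv N hN F hF0
    have hB : pvAgree N (pvPhi ks ^ e * pvSer (pvInv N F)) 1 := by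
      refine pvAgree_trans ?_ hz
      exact pvAgree_mul (pvAgree_symm hFs) (pvAgree_refl _ _)
    have hc : PowerSeries.constantCoeff (pvPhi ks ^ e) = 1 := by
      rw [map_pow, pvPhi_constCoeff ks hks, one_pow]
    have hyz : pvAgree N (pvSer y) (pvSer (pvInv N F)) :=
      pvAgree_cancel hc (pvAgree_trans hA (pvAgree_symm hB))
    have hzlen : (pvInv N F).length = N := (pvInv_spec N hN F).1
    rw [hAdef, hBdef, if_neg (by omega), if_neg (by omega)]
    exact pvList_eq_of_agree N hylen hzlen hyz
  · -- exponent = 0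
    subst h0
    rw [eta_power_qexp, if_pos rfl, hBdef, if_pos rfl]
  · -- positive exponent
    set e := exponent.toNat with hedef
    have hbody : (fun (c : List Int) (k : Int) =>
        (PySem.List.pyRange 0 exponent 1).foldl (fun c _ => pvSubLoop k nmax c) c)
        = (fun (c : List Int) (k : Int) => (pvSubLoop k nmax)^[e] c) := by
      funext c k
      rw [pvFoldl_const, PySem.List.length_pyRange_one]
      norm_num
      rfl
    have hAdef : eta_power_qexp exponent nmax =
        ks.foldl (fun c k => (pvSubLoop k nmax)^[e] c) (pvUnit N) := by
      rw [eta_power_qexp, if_neg (by omega), if_pos (by omega), hbody]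
    obtain ⟨hAl, hAs⟩ := pvAFoldSer nmax hn e ks hks (pvUnit N) (pvUnit_length N)
    have hA : pvAgree N (pvSer (ks.foldl (fun c k => (pvSubLoop k nmax)^[e] c) (pvUnit N)))
        (pvPhi ks ^ e) := by
      refine pvAgree_trans hAs ?_
      have h1 := pvAgree_mul (pvAgree_refl N (pvPhi ks ^ e)) (pvSer_unit N hN)
      rwa [mul_one] at h1
    have hBl : (pvPowLoop N (pvUnit N) E e).length = N :=
      pvPowLoop_length N e _ _ (pvUnit_length N)
    have hB : pvAgree N (pvSer (pvPowLoop N (pvUnit N) E e)) (pvPhi ks ^ e) := by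
      refine pvAgree_trans (pvPowLoop_ser N e (pvUnit N) E) ?_
      have h1 := pvAgree_mul (pvSer_unit N hN) (pvAgree_pow hEser e)
      rwa [one_mul] at h1
    rw [hAdef, hBdef, if_neg (by omega), if_pos (by omega)]
    exact pvList_eq_of_agree N hAl hBl (pvAgree_trans hA (pvAgree_symm hB))

-- ===== VERDICT (by name: the statement is the Claim_ definition above) =====
theorem eta_power_qexp_spec : Claim_equal_eta_power_qexp := by
  intro exponent nmax _ hpre
  unfold Spec_eta_power_qexp
  exact pvMain exponent nmax hpre
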